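-- pv_equiv track=rewrite | github.com/jin2001-2001/dist_research | Dora_toolbox/stage2exp_graph_O2_for_stage2_latency.py | pareto_min_min
-- ===== SOURCE A (Python) =====
-- def pareto_min_min(x, y):
--     """Return indices of Pareto-optimal points for minimizing both x and y."""
--     points = list(zip(x, y))
--     pareto_idx = []
--
--     for i, (xi, yi) in enumerate(points):
--         dominated = False
--         for j, (xj, yj) in enumerate(points):
--             # j dominates i if j is <= on both axes and strictly < on one axis
--             if (xj <= xi and yj <= yi) and (xj < xi or yj < yi):
--                 dominated = True
--                 break
--         if not dominated:
--             pareto_idx.append(i)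
--
--     return pareto_idx
-- ===== SOURCE B (Python) =====
-- def pareto_min_min(x, y):
--     """Return indices of Pareto-optimal points for minimizing both x and y.
--
--     O(n log n): min-y per distinct x, then a prefix-min sweep over the sorted
--     distinct x values; point i is Pareto-optimal iff y_i is the minimum of its
--     x-group and every strictly smaller x-group has min-y above y_i.
--     """
--     pts = list(zip(x, y))
--     miny = {}
--     for xi, yi in pts:
--         if xi not in miny or yi < miny[xi]:
--             miny[xi] = yi
--     best = {}            # min y over strictly smaller x values (None if no smaller x)
--     b = None
--     for xv in sorted(miny):
--         best[xv] = b
--         if b is None or miny[xv] < b: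
--             b = miny[xv]
--     return [i for i, (xi, yi) in enumerate(pts)
--             if yi == miny[xi] and (best[xi] is None or yi < best[xi])]
-- ===== Notes on version B (the rewrite author's own statement) =====
-- stated objective: faster
-- what changed: Replaced the quadratic all-pairs dominance scan by a min-y-per-distinct-x dictionary followed by a prefix-min sweep over the sorted distinct x values; a point is kept iff its y is the minimum of its x-group and strictly below the min-y of every smaller x.
import Mathlib
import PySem

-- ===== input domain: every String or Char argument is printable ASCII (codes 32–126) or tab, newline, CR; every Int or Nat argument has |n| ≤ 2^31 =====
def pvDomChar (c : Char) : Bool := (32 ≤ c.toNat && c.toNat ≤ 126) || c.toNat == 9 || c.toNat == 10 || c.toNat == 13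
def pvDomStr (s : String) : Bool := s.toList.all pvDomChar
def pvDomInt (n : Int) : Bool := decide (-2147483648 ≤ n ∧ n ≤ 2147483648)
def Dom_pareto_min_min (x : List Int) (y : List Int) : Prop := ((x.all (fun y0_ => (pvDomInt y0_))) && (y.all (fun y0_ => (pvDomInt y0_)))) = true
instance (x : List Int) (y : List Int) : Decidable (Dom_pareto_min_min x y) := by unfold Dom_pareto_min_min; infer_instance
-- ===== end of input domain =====

-- B replaces A's all-pairs dominance scan by a min-y-per-distinct-x dictionary
-- plus a prefix-min sweep over the sorted distinct x values.

-- ===== PORT A =====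
-- A's inner 'for j' loop with break: true as soon as a dominator is found
def paretoDominated (points : List (Int × Int)) (xi yi : Int) : Bool :=
  match points with
  | [] => false
  | (xj, yj) :: rest =>
    if (xj ≤ xi ∧ yj ≤ yi) ∧ (xj < xi ∨ yj < yi) then true
    else paretoDominated rest xi yi

def pareto_min_min (x : List Int) (y : List Int) : List Int :=
  let points := x.zip y
  (PySem.List.enumerate points).foldl
    (fun acc ip =>
      if paretoDominated points ip.2.1 ip.2.2 then acc else acc ++ [ip.1])
    []

-- ===== PORT B =====
def pareto_min_min_alt (x : List Int) (y : List Int) : List Int :=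
  let pts := x.zip y
  -- miny: min y per distinct x value
  let miny : PySem.Dict Int Int := pts.foldl
    (fun d p =>
      match d.get? p.1 with
      | none => d.insert p.1 p.2
      | some m => if p.2 < m then d.insert p.1 p.2 else d)
    PySem.Dict.empty
  -- prefix-min sweep over sorted distinct x values; best[xv] = min y over strictly smaller x
  let st := (PySem.List.sorted miny.keys id).foldl
    (fun (st : PySem.Dict Int (Option Int) × Option Int) xv =>
      let bd := st.1.insert xv st.2
      let mv := (miny.get? xv).getD 0   -- miny[xv]; the key is always present
      match st.2 with
      | none => (bd, some mv)
      | some bv => (bd, if mv < bv then some mv else some bv))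
    (PySem.Dict.empty, none)
  let best := st.1
  (PySem.List.enumerate pts).foldl
    (fun acc ip =>
      let gv := (miny.get? ip.2.1).getD 0          -- miny[xi]; always present
      let bo := (best.get? ip.2.1).getD none       -- best[xi]; always present
      if ip.2.2 == gv && (match bo with | none => true | some bv => decide (ip.2.2 < bv))
      then acc ++ [ip.1] else acc)
    []

-- ===== PRECONDITION & SPEC =====
def Spec_pareto_min_min (x : List Int) (y : List Int) (out : List Int) : Prop := out = pareto_min_min_alt x y
instance (x : List Int) (y : List Int) (out : List Int) : Decidable (Spec_pareto_min_min x y out) := by unfold Spec_pareto_min_min; infer_instance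

-- ===== CLAIM (what is proved, stated in full; the proofs are below) =====
def Claim_equal_pareto_min_min : Prop := ∀ (x : List Int) (y : List Int), Dom_pareto_min_min x y → Spec_pareto_min_min x y (pareto_min_min x y)

-- ===== LEMMAS AND PROOFS =====

-- option-min accumulator (the shape of both of B's running minima)
def om2 : Option Int → Int → Option Int
  | none, w => some w
  | some m, w => some (min m w)

def minF (l : List Int) : Option Int := l.foldl om2 none

-- the y values of the points whose x equals v
def groupL (pts : List (Int × Int)) (v : Int) : List Int :=
  (pts.filter (fun p => p.1 == v)).map (fun p => p.2)

lemma foldl_om2_none_iff (l : List Int) : ∀ o : Option Int,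
    l.foldl om2 o = none ↔ (l = [] ∧ o = none) := by
  induction l with
  | nil => simp
  | cons w t ih =>
    intro o
    simp only [List.foldl_cons, ih]
    cases o <;> simp [om2]

lemma foldl_om2_mem (l : List Int) : ∀ (o : Option Int) (m : Int),
    l.foldl om2 o = some m → m ∈ l ∨ o = some m := by
  induction l with
  | nil => simp
  | cons w t ih =>
    intro o m h
    rcases ih _ _ h with hm | hm
    · exact Or.inl (List.mem_cons_of_mem _ hm)
    · cases o with
      | none => simp [om2] at hm; exact Or.inl (by simp [hm])
      | some a =>
        simp [om2] at hm
        rcases le_total a w with hle | hle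
        · right; simp [min_eq_left hle] at hm; simp [hm]
        · left; simp [min_eq_right hle] at hm; simp [hm]

lemma foldl_om2_lb (l : List Int) : ∀ (o : Option Int) (m : Int),
    l.foldl om2 o = some m →
    (∀ w ∈ l, m ≤ w) ∧ (∀ k, o = some k → m ≤ k) := by
  induction l with
  | nil => intro o m h; simp_all
  | cons w t ih =>
    intro o m h
    rcases ih _ _ h with ⟨h1, h2⟩
    cases o with
    | none =>
      have := h2 w (by simp [om2])
      refine ⟨?_, by simp⟩
      intro u hu
      rcases List.mem_cons.1 hu with rfl | hu
      · exact this
      · exact h1 u hu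
    | some a =>
      have hmin := h2 (min a w) (by simp [om2])
      refine ⟨?_, ?_⟩
      · intro u hu
        rcases List.mem_cons.1 hu with rfl | hu
        · exact le_trans hmin (min_le_right a u)
        · exact h1 u hu
      · intro k hk
        cases hk
        exact le_trans hmin (min_le_left a w)

lemma minF_ne_none {l : List Int} (h : l ≠ []) : ∃ m, minF l = some m := by
  cases hm : minF l with
  | none => exact absurd ((foldl_om2_none_iff l none).1 hm).1 h
  | some m => exact ⟨m, rfl⟩

lemma minF_mem {l : List Int} {m : Int} (h : minF l = some m) : m ∈ l := by
  rcases foldl_om2_mem l none m h with hm | hm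
  · exact hm
  · cases hm

lemma minF_lb {l : List Int} {m : Int} (h : minF l = some m) : ∀ w ∈ l, m ≤ w :=
  (foldl_om2_lb l none m h).1

lemma minF_forall_lt {l : List Int} (z : Int) :
    (∀ w ∈ l, z < w) ↔ (∀ m, minF l = some m → z < m) := by
  constructor
  · intro h m hm; exact h m (minF_mem hm)
  · intro h w hw
    rcases minF_ne_none (l := l) (by rintro rfl; simp at hw) with ⟨m, hm⟩
    exact lt_of_lt_of_le (h m hm) (minF_lb hm w hw)

-- ===== A-side characterisation =====
lemma paretoDominated_false_iff (pts : List (Int × Int)) (xi yi : Int) :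
    paretoDominated pts xi yi = false ↔
      (∀ p ∈ pts, p.1 = xi → yi ≤ p.2) ∧ (∀ p ∈ pts, p.1 < xi → yi < p.2) := by
  induction pts with
  | nil => simp [paretoDominated]
  | cons p t ih =>
    obtain ⟨a, b⟩ := p
    by_cases hc : (a ≤ xi ∧ b ≤ yi) ∧ (a < xi ∨ b < yi)
    · simp only [paretoDominated, if_pos hc]
      constructor
      · intro h; cases h
      · rintro ⟨h1, h2⟩
        exfalso
        have he := h1 (a, b) (by simp)
        have hl := h2 (a, b) (by simp)
        simp at he hl
        omega
    · simp only [paretoDominated, if_neg hc, ih]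
      constructor
      · rintro ⟨h1, h2⟩
        refine ⟨?_, ?_⟩ <;> intro p hp <;> rcases List.mem_cons.1 hp with rfl | hp
        · intro hq; simp at hq ⊢; omega
        · exact h1 p hp
        · intro hq; simp at hq ⊢; omega
        · exact h2 p hp
      · rintro ⟨h1, h2⟩
        exact ⟨fun p hp => h1 p (List.mem_cons_of_mem _ hp),
               fun p hp => h2 p (List.mem_cons_of_mem _ hp)⟩

-- ===== B-side: the miny fold =====
lemma miny_get_aux (pts : List (Int × Int)) (v : Int) :
    ∀ d : PySem.Dict Int Int,
    (pts.foldl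
      (fun d p =>
        match d.get? p.1 with
        | none => d.insert p.1 p.2
        | some m => if p.2 < m then d.insert p.1 p.2 else d)
      d).get? v = (groupL pts v).foldl om2 (d.get? v) := by
  induction pts with
  | nil => intro d; simp [groupL]
  | cons p t ih =>
    intro d
    simp only [List.foldl_cons, ih]
    by_cases hv : p.1 = v
    · have hgroup : groupL (p :: t) v = p.2 :: groupL t v := by
        simp [groupL, hv]
      rw [hgroup]
      simp only [List.foldl_cons]
      congr 1
      cases hd : d.get? p.1 with
      | none =>
        rw [hv] at hd
        rw [hv, PySem.Dict.get?_insert_self, hd]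
        rfl
      | some m =>
        rw [hv] at hd
        by_cases hlt : p.2 < m
        · simp only [if_pos hlt]
          rw [hv, PySem.Dict.get?_insert_self, hd, om2]
          congr 1
          omega
        · simp only [if_neg hlt]
          rw [hd, om2]
          congr 1
          omega
    · have hgroup : groupL (p :: t) v = groupL t v := by
        simp [groupL, hv]
      rw [hgroup]
      congr 1
      cases hd : d.get? p.1 with
      | none => exact PySem.Dict.get?_insert_of_ne d p.2 (fun h => hv h.symm)
      | some m =>
        show (if p.2 < m then d.insert p.1 p.2 else d).get? v = d.get? v
        by_cases hlt : p.2 < m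
        · rw [if_pos hlt]
          exact PySem.Dict.get?_insert_of_ne d p.2 (fun h => hv h.symm)
        · rw [if_neg hlt]

lemma miny_keys_nodup_aux (pts : List (Int × Int)) :
    ∀ d : PySem.Dict Int Int, d.keys.Nodup →
    (pts.foldl
      (fun d p =>
        match d.get? p.1 with
        | none => d.insert p.1 p.2
        | some m => if p.2 < m then d.insert p.1 p.2 else d)
      d).keys.Nodup := by
  induction pts with
  | nil => intro d h; exact h
  | cons p t ih =>
    intro d h
    simp only [List.foldl_cons]
    apply ih
    cases hd : d.get? p.1 with
    | none =>
      have hc : d.contains p.1 = false := by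
        rw [PySem.Dict.contains_eq_isSome_get?, hd]; rfl
      rw [PySem.Dict.keys_insert_of_not_contains d p.2 hc]
      have hmem : p.1 ∉ d.keys := by
        rw [← PySem.Dict.get?_eq_none_iff_not_mem_keys]; exact hd
      simp only [List.nodup_append, List.nodup_cons]
      refine ⟨h, by simp, ?_⟩
      intro a ha b hb hab
      simp at hb
      exact hmem (hb ▸ hab ▸ ha)
    | some m =>
      by_cases hlt : p.2 < m
      · simp only [if_pos hlt]
        have hc : d.contains p.1 = true := by
          rw [PySem.Dict.contains_eq_isSome_get?, hd]; rfl
        rw [PySem.Dict.keys_insert_of_contains d p.2 hc]; exact h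
      · simp only [if_neg hlt]; exact h

-- ===== B-side: the best fold =====
lemma best_fold_get_of_not_mem (miny : PySem.Dict Int Int) (ks : List Int) :
    ∀ (bd : PySem.Dict Int (Option Int)) (b : Option Int) (v : Int), v ∉ ks →
    ((ks.foldl
      (fun (st : PySem.Dict Int (Option Int) × Option Int) xv =>
        let bd := st.1.insert xv st.2
        let mv := (miny.get? xv).getD 0
        match st.2 with
        | none => (bd, some mv)
        | some bv => (bd, if mv < bv then some mv else some bv))
      (bd, b)).1).get? v = bd.get? v := by
  induction ks with
  | nil => intro bd b v _; rfl
  | cons k t ih =>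
    intro bd b v hv
    simp only [List.foldl_cons]
    have hvk : v ≠ k := fun h => hv (h ▸ List.mem_cons_self)
    have hvt : v ∉ t := fun h => hv (List.mem_cons_of_mem _ h)
    cases b with
    | none =>
      rw [ih _ _ _ hvt]
      exact PySem.Dict.get?_insert_of_ne bd none hvk
    | some bv =>
      by_cases hlt : (miny.get? k).getD 0 < bv
      · simp only [if_pos hlt]
        rw [ih _ _ _ hvt]
        exact PySem.Dict.get?_insert_of_ne bd _ hvk
      · simp only [if_neg hlt]
        rw [ih _ _ _ hvt]
        exact PySem.Dict.get?_insert_of_ne bd _ hvk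

lemma best_fold_get (miny : PySem.Dict Int Int) (ks : List Int)
    (hs : ks.Pairwise (· < ·)) :
    ∀ (bd : PySem.Dict Int (Option Int)) (b : Option Int) (v : Int), v ∈ ks →
    ((ks.foldl
      (fun (st : PySem.Dict Int (Option Int) × Option Int) xv =>
        let bd := st.1.insert xv st.2
        let mv := (miny.get? xv).getD 0
        match st.2 with
        | none => (bd, some mv)
        | some bv => (bd, if mv < bv then some mv else some bv))
      (bd, b)).1).get? v =
      some (((ks.filter (fun k => decide (k < v))).map
              (fun k => (miny.get? k).getD 0)).foldl om2 b) := by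
  induction ks with
  | nil => intro _ _ v hv; cases hv
  | cons k t ih =>
    have hk : ∀ r ∈ t, k < r := fun r hr => (List.pairwise_cons.1 hs).1 r hr
    have hst := (List.pairwise_cons.1 hs).2
    intro bd b v hv
    simp only [List.foldl_cons]
    have hstep : (match b with
        | none => (bd.insert k b, some ((miny.get? k).getD 0))
        | some bv => (bd.insert k b,
            if (miny.get? k).getD 0 < bv then some ((miny.get? k).getD 0) else some bv))
        = (bd.insert k b, om2 b ((miny.get? k).getD 0)) := by
      cases b with
      | none => rfl
      | some bv =>
        by_cases hlt : (miny.get? k).getD 0 < bv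
        · simp only [if_pos hlt, om2]
          rw [min_eq_right (le_of_lt hlt)]
        · simp only [if_neg hlt, om2]
          rw [min_eq_left (le_of_not_gt hlt)]
    rw [hstep]
    rcases List.mem_cons.1 hv with rfl | hvt
    · have hnot : v ∉ t := fun h => lt_irrefl v (hk v h)
      have hfil : List.filter (fun k => decide (k < v)) (v :: t) = [] := by
        rw [List.filter_cons, if_neg (by simp)]
        exact List.filter_eq_nil_iff.2 (fun a ha => by
          simp only [decide_eq_true_eq]; exact not_lt.2 (le_of_lt (hk a ha)))
      rw [hfil]
      rw [best_fold_get_of_not_mem miny t _ _ _ hnot]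
      simp [PySem.Dict.get?_insert_self]
    · have hkv : k < v := hk v hvt
      have hfil : List.filter (fun k' => decide (k' < v)) (k :: t)
          = k :: List.filter (fun k' => decide (k' < v)) t := by
        rw [List.filter_cons, if_pos (by simpa using hkv)]
      rw [hfil]
      simp only [List.map_cons, List.foldl_cons]
      exact ih hst _ _ _ hvt

-- enumerate yields members of the underlying list
lemma enumerate_snd_mem {α : Type} (l : List α) :
    ∀ (s : Int) (p : Int × α), p ∈ PySem.List.enumerate l s → p.2 ∈ l := by
  induction l with
  | nil => intro s p h; simp [PySem.List.enumerate] at h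
  | cons a t ih =>
    intro s p h
    simp only [PySem.List.enumerate, List.mem_cons] at h
    rcases h with rfl | h
    · simp
    · exact List.mem_cons_of_mem _ (ih _ _ h)

-- ===== VERDICT (by name: the statement is the Claim_ definition above) =====
theorem pareto_min_min_spec : Claim_equal_pareto_min_min := by
  intro x y _
  unfold Spec_pareto_min_min pareto_min_min pareto_min_min_alt
  set pts := x.zip y with hpts
  set miny := pts.foldl
    (fun d p =>
      match d.get? p.1 with
      | none => d.insert p.1 p.2
      | some m => if p.2 < m then d.insert p.1 p.2 else d)
    PySem.Dict.empty with hminy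
  -- value of miny at any key
  have hget : ∀ v, miny.get? v = minF (groupL pts v) := by
    intro v
    rw [hminy, miny_get_aux]
    simp [PySem.Dict.get?_empty, minF]
  -- key membership
  have hkeys : ∀ v, v ∈ miny.keys ↔ groupL pts v ≠ [] := by
    intro v
    constructor
    · intro hv hnil
      have : miny.get? v = none := by rw [hget, hnil]; rfl
      exact (PySem.Dict.get?_eq_none_iff_not_mem_keys miny v).1 this hv
    · intro hne
      by_contra hv
      have := (PySem.Dict.get?_eq_none_iff_not_mem_keys miny v).2 hv
      rw [hget] at this
      exact hne ((foldl_om2_none_iff _ none).1 this).1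
  set ks := PySem.List.sorted miny.keys id with hks
  have hperm : ks.Perm miny.keys := PySem.List.sorted_perm miny.keys id false
  have hnodup : ks.Nodup := hperm.nodup_iff.2 (miny_keys_nodup_aux pts _ (by simp [PySem.Dict.keys_empty]))
  have hmemks : ∀ v, v ∈ ks ↔ groupL pts v ≠ [] := by
    intro v; rw [hperm.mem_iff]; exact hkeys v
  have hsorted : ks.Pairwise (· < ·) := by
    have h1 : ks.Pairwise (· ≤ ·) := by
      simpa using PySem.List.sorted_pairwise miny.keys id
    have h2 : ks.Pairwise (· ≠ ·) := hnodup
    exact (h1.and h2).imp (fun hab => lt_of_le_of_ne hab.1 hab.2)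
  -- the per-point test equivalence
  apply PySem.List.foldl_congr_mem
  intro acc ip hip
  obtain ⟨i, xi, yi⟩ := ip
  have hp : (xi, yi) ∈ pts := enumerate_snd_mem pts 0 _ hip
  have hyg : yi ∈ groupL pts xi := by
    simp only [groupL, List.mem_map, List.mem_filter]
    exact ⟨(xi, yi), ⟨hp, by simp⟩, rfl⟩
  have hgne : groupL pts xi ≠ [] := fun h => by rw [h] at hyg; cases hyg
  obtain ⟨g, hg⟩ := minF_ne_none hgne
  have hgv : (miny.get? xi).getD 0 = g := by rw [hget, hg]; rfl
  -- best value at xi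
  have hxik : xi ∈ ks := (hmemks xi).2 hgne
  have hbest : ((ks.foldl
      (fun (st : PySem.Dict Int (Option Int) × Option Int) xv =>
        let bd := st.1.insert xv st.2
        let mv := (miny.get? xv).getD 0
        match st.2 with
        | none => (bd, some mv)
        | some bv => (bd, if mv < bv then some mv else some bv))
      (PySem.Dict.empty, none)).1).get? xi =
      some (minF ((ks.filter (fun k => decide (k < xi))).map
              (fun k => (miny.get? k).getD 0))) :=
    best_fold_get miny ks hsorted _ _ _ hxik
  set L := (ks.filter (fun k => decide (k < xi))).map (fun k => (miny.get? k).getD 0) with hL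
  -- equivalence of the two per-point predicates
  have key : (paretoDominated pts xi yi = false) ↔
      ((yi == g) && (match minF L with | none => true | some bv => decide (yi < bv))) = true := by
    rw [paretoDominated_false_iff]
    have c1 : (∀ p ∈ pts, p.1 = xi → yi ≤ p.2) ↔ yi = g := by
      constructor
      · intro h
        have hgmem := minF_mem hg
        simp only [groupL, List.mem_map, List.mem_filter] at hgmem
        obtain ⟨p, ⟨hpmem, hpx⟩, hpy⟩ := hgmem
        have h1 : yi ≤ g := hpy ▸ h p hpmem (by simpa using hpx)
        have h2 : g ≤ yi := minF_lb hg yi hyg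
        omega
      · intro h p hpmem hpx
        have : p.2 ∈ groupL pts xi := by
          simp only [groupL, List.mem_map, List.mem_filter]
          exact ⟨p, ⟨hpmem, by simp [hpx]⟩, rfl⟩
        have := minF_lb hg p.2 this
        omega
    have c2 : (∀ p ∈ pts, p.1 < xi → yi < p.2) ↔ (∀ w ∈ L, yi < w) := by
      constructor
      · intro h w hw
        rw [hL] at hw
        simp only [List.mem_map, List.mem_filter, decide_eq_true_eq] at hw
        obtain ⟨k, ⟨hkks, hklt⟩, hkw⟩ := hw
        have hkne := (hmemks k).1 hkks
        obtain ⟨gk, hgk⟩ := minF_ne_none hkne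
        have hwgk : w = gk := by rw [← hkw, hget, hgk]; rfl
        have hgkmem := minF_mem hgk
        simp only [groupL, List.mem_map, List.mem_filter] at hgkmem
        obtain ⟨p, ⟨hpmem, hpx⟩, hpy⟩ := hgkmem
        have hpx' : p.1 = k := by simpa using hpx
        have := h p hpmem (by omega)
        omega
      · intro h p hpmem hpx
        have hpk : p.2 ∈ groupL pts p.1 := by
          simp only [groupL, List.mem_map, List.mem_filter]
          exact ⟨p, ⟨hpmem, by simp⟩, rfl⟩
        have hpne : groupL pts p.1 ≠ [] := fun hh => by rw [hh] at hpk; cases hpk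
        obtain ⟨gp, hgp⟩ := minF_ne_none hpne
        have hmemL : (miny.get? p.1).getD 0 ∈ L := by
          rw [hL]
          simp only [List.mem_map, List.mem_filter, decide_eq_true_eq]
          exact ⟨p.1, ⟨(hmemks p.1).2 hpne, hpx⟩, rfl⟩
        have h1 := h _ hmemL
        have h2 : (miny.get? p.1).getD 0 = gp := by rw [hget, hgp]; rfl
        have h3 := minF_lb hgp p.2 hpk
        omega
    rw [c1, c2, minF_forall_lt]
    cases hmL : minF L with
    | none =>
      simp only [Bool.and_true, beq_iff_eq]
      constructor
      · rintro ⟨h1, _⟩; exact h1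
      · intro h; exact ⟨h, fun m hm => by cases hm⟩
    | some bv =>
      simp only [Bool.and_eq_true, beq_iff_eq, decide_eq_true_eq]
      constructor
      · rintro ⟨h1, h2⟩; exact ⟨h1, h2 bv rfl⟩
      · rintro ⟨h1, h2⟩; exact ⟨h1, fun m hm => by cases hm; exact h2⟩
  -- conclude for this list element
  rw [hgv, hbest]
  simp only [Option.getD_some]
  by_cases hdom : paretoDominated pts xi yi = false
  · rw [hdom, if_neg (by simp), if_pos (key.1 hdom)]
  · have hdom' : paretoDominated pts xi yi = true := by
      cases h : paretoDominated pts xi yi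
      · exact absurd h hdom
      · rfl
    rw [hdom', if_pos rfl, if_neg (fun hc => hdom (key.2 hc))]
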